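-- pv_equiv track=rewrite | github.com/mohamadsolkhannawawi/informatics-practicum-portfolio | Semester-4/Algorithm-Strategy-Analysis/01-Algorithm-Strategy-Analysis/InfinityKos.py | InfinityKos
-- ===== SOURCE A (Python) =====
-- def InfinityKos(n):
--     if n < 1:
--         return ""
--
--     deretFibonacci = [1, 1]
--     while len(deretFibonacci) < n:
--         deretFibonacci.append(deretFibonacci[-1] + deretFibonacci[-2])
--
--     hasil = []
--     huruf = 'A'
--     fibIndex = 0
--     posHuruf = [2]
--     nextGap = 3
--
--     while posHuruf[-1] < n:
--         posHuruf.append(posHuruf[-1] + nextGap)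
--         nextGap += 1
--
--     for i in range(1, n + 1):
--         if i in posHuruf:
--             hasil.append(huruf)
--             huruf = chr(ord(huruf) + 1)
--         else:
--             hasil.append(str(deretFibonacci[fibIndex]))
--             fibIndex += 1
--
--     return " ".join(hasil)
-- ===== SOURCE B (Python) =====
-- def InfinityKos(n):
--     if n < 1:
--         return ""
--     result = []
--     a, b = 1, 1
--     nextLetterPos, gap = 2, 3
--     letter = 'A'
--     for i in range(1, n + 1):
--         if i == nextLetterPos:
--             result.append(letter)
--             letter = chr(ord(letter) + 1)
--             nextLetterPos += gap
--             gap += 1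
--         else:
--             result.append(str(a))
--             a, b = b, a + b
--     return " ".join(result)
-- ===== Notes on version B (the rewrite author's own statement) =====
-- stated objective: simpler
-- what changed: Replaced A's two precomputation passes (a full Fibonacci table and a list of letter positions with an O(sqrt n) membership scan per element) by a single streaming pass that keeps only a running Fibonacci pair and the next letter position.
import Mathlib
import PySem

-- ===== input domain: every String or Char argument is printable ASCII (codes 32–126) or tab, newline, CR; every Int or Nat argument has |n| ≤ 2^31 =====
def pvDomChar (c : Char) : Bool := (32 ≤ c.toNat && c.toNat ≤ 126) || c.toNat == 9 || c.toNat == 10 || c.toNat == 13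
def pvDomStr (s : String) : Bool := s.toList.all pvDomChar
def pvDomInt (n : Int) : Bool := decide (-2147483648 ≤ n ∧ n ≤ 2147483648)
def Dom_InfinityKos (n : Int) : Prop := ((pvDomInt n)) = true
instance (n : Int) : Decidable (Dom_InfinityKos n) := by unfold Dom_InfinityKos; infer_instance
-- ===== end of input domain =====

-- B replaces A's two precomputation passes (Fibonacci table + letter-position list with a
-- membership scan per element) by a single streaming pass keeping a running Fibonacci pair
-- and the next letter position; objective: simpler.

-- ===== PORT A =====
-- while len(deretFibonacci) < n: deretFibonacci.append(deretFibonacci[-1] + deretFibonacci[-2])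
-- (acc starts with two elements and only grows, so acc[-1]/acc[-2] never raise; the .getD 0
-- default is unreachable)
def pvFibLoopA (n : Int) (acc : List Int) : List Int :=
  if (acc.length : Int) < n then
    pvFibLoopA n (acc ++ [(PySem.List.pyGet? acc (-1)).getD 0 + (PySem.List.pyGet? acc (-2)).getD 0])
  else acc
termination_by (n - acc.length).toNat
decreasing_by simp [List.length_append]; omega

-- while posHuruf[-1] < n: posHuruf.append(posHuruf[-1] + nextGap); nextGap += 1
-- (hg records that nextGap stays positive, which the loop needs to terminate;
-- acc starts nonempty so posHuruf[-1] never raises)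
def pvPosLoopA (n : Int) (acc : List Int) (nextGap : Int) (hg : 0 < nextGap) : List Int :=
  if (PySem.List.pyGet? acc (-1)).getD 0 < n then
    pvPosLoopA n (acc ++ [(PySem.List.pyGet? acc (-1)).getD 0 + nextGap]) (nextGap + 1) (by omega)
  else acc
termination_by (n - (PySem.List.pyGet? acc (-1)).getD 0).toNat
decreasing_by simp [PySem.List.pyGet?_neg_one_append_singleton]; omega

-- for i in range(1, n+1): …  (rem counts the remaining iterations)
def pvMainLoopA (fibs pos : List Int) : Nat → Int → List String → Char → Int → List String × Char × Int
  | 0, _, hasil, huruf, fibIndex => (hasil, huruf, fibIndex)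
  | rem + 1, i, hasil, huruf, fibIndex =>
    if pos.contains i then
      pvMainLoopA fibs pos rem (i + 1) (hasil ++ [String.singleton huruf])
        (Char.ofNat (huruf.toNat + 1)) fibIndex
    else
      pvMainLoopA fibs pos rem (i + 1)
        (hasil ++ [PySem.Int.toStr ((PySem.List.pyGet? fibs fibIndex).getD 0)]) huruf (fibIndex + 1)

def InfinityKos (n : Int) : String :=
  if n < 1 then ""
  else
    let fibs := pvFibLoopA n [1, 1]
    let pos := pvPosLoopA n [2] 3 (by omega)
    PySem.Str.join " " (pvMainLoopA fibs pos n.toNat 1 [] 'A' 0).1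

-- ===== PORT B =====
-- for i in range(1, n+1) with state (a, b, nextLetterPos, gap, letter, result)
def pvLoopB : Nat → Int → Int → Int → Int → Int → Char → List String → List String
  | 0, _, _, _, _, _, _, res => res
  | rem + 1, i, a, b, nlp, gap, letter, res =>
    if i = nlp then
      pvLoopB rem (i + 1) a b (nlp + gap) (gap + 1) (Char.ofNat (letter.toNat + 1))
        (res ++ [String.singleton letter])
    else
      pvLoopB rem (i + 1) b (a + b) nlp gap letter (res ++ [PySem.Int.toStr a])

def InfinityKos_alt (n : Int) : String :=
  if n < 1 then "" else PySem.Str.join " " (pvLoopB n.toNat 1 1 1 2 3 'A' [])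

-- ===== PRECONDITION & SPEC =====
def Spec_InfinityKos (n : Int) (out : String) : Prop := out = InfinityKos_alt n
instance (n : Int) (out : String) : Decidable (Spec_InfinityKos n out) := by unfold Spec_InfinityKos; infer_instance

-- ===== CLAIM (what is proved, stated in full; the proofs are below) =====
def Claim_equal_InfinityKos : Prop := ∀ (n : Int), Dom_InfinityKos n → Spec_InfinityKos n (InfinityKos n)

-- ===== LEMMAS AND PROOFS =====

-- mathematical reference sequences: fibI k = k-th Fibonacci value, triI k = k-th letter position
def fibI : Nat → Int
  | 0 => 1
  | 1 => 1
  | k + 2 => fibI k + fibI (k + 1)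

def triI : Nat → Int
  | 0 => 2
  | k + 1 => triI k + (k + 3)

theorem triI_ge (k : Nat) : (k : Int) + 2 ≤ triI k := by
  induction k with
  | zero => simp [triI]
  | succ k ih => simp only [triI]; push_cast; omega

theorem triI_mono : StrictMono triI := by
  apply strictMono_nat_of_lt_succ
  intro k
  have := triI_ge k
  simp only [triI]; omega

theorem fibLoop_spec (n : Int) (acc : List Int) (h2 : 2 ≤ acc.length)
    (hk : ∀ k (h : k < acc.length), acc[k] = fibI k) :
    n ≤ ((pvFibLoopA n acc).length : Int) ∧
      ∀ k (h : k < (pvFibLoopA n acc).length), (pvFibLoopA n acc)[k] = fibI k := by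
  induction acc using pvFibLoopA.induct (n := n) with
  | case1 acc hlt ih =>
    rw [pvFibLoopA, if_pos hlt]
    have hx : (PySem.List.pyGet? acc (-1)).getD 0 + (PySem.List.pyGet? acc (-2)).getD 0
        = fibI acc.length := by
      rw [PySem.List.pyGet?_neg_ofNat acc 1 (by omega) (by omega),
          PySem.List.pyGet?_neg_ofNat acc 2 (by omega) (by omega)]
      rw [List.getElem?_eq_getElem (by omega), List.getElem?_eq_getElem (by omega)]
      simp only [Option.getD_some]
      rw [hk _ (by omega), hk _ (by omega)]
      have hstep : fibI acc.length = fibI (acc.length - 2) + fibI (acc.length - 2 + 1) := by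
        conv_lhs => rw [show acc.length = acc.length - 2 + 2 by omega]
        simp [fibI]
      rw [hstep, show acc.length - 1 = acc.length - 2 + 1 by omega]
      ring
    have h2' : 2 ≤ (acc ++ [(PySem.List.pyGet? acc (-1)).getD 0 + (PySem.List.pyGet? acc (-2)).getD 0]).length := by
      rw [List.length_append]; omega
    have hk' : ∀ k (h : k < (acc ++ [(PySem.List.pyGet? acc (-1)).getD 0 + (PySem.List.pyGet? acc (-2)).getD 0]).length),
        (acc ++ [(PySem.List.pyGet? acc (-1)).getD 0 + (PySem.List.pyGet? acc (-2)).getD 0])[k] = fibI k := by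
      intro k hklt
      rcases Nat.lt_or_ge k acc.length with h | h
      · rw [List.getElem_append_left h]; exact hk k h
      · have hke : k = acc.length := by rw [List.length_append] at hklt; simp at hklt; omega
        subst hke
        rw [List.getElem_append_right (by omega)]
        simpa using hx
    exact ih h2' hk'
  | case2 acc hge =>
    rw [pvFibLoopA, if_neg hge]
    exact ⟨by omega, hk⟩

theorem lastTri (m : Nat) :
    PySem.List.pyGet? ((List.range (m + 1)).map triI) (-1) = some (triI m) := by
  rw [List.range_succ, List.map_append, List.map_singleton]
  exact PySem.List.pyGet?_neg_one_append_singleton _ _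

theorem posLoop_aux (n : Int) (f : Nat) : ∀ (m : Nat) (hp : (0:Int) < (m:Int) + 3),
    (n - triI m).toNat ≤ f →
    ∃ M : Nat, pvPosLoopA n ((List.range (m + 1)).map triI) ((m : Int) + 3) hp
        = (List.range (M + 1)).map triI ∧ n ≤ triI M := by
  induction f with
  | zero =>
    intro m hp hf
    have hle : n ≤ triI m := by omega
    refine ⟨m, ?_, hle⟩
    rw [pvPosLoopA, lastTri]
    simp only [Option.getD_some]
    rw [if_neg (by omega)]
  | succ f ih =>
    intro m hp hf
    by_cases hlt : triI m < n
    · rw [pvPosLoopA, lastTri]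
      simp only [Option.getD_some]
      rw [if_pos hlt]
      have happ : (List.range (m + 1)).map triI ++ [triI m + ((m : Int) + 3)]
          = (List.range (m + 1 + 1)).map triI := by
        rw [List.range_succ (n := m + 1), List.map_append, List.map_singleton]
        simp only [triI]
      rw [happ]
      have h1 : triI (m+1) = triI m + ((m:Int) + 3) := by
        simp only [triI]
      have := ih (m + 1) (by push_cast; omega) (by omega)
      convert this using 3
    · refine ⟨m, ?_, by omega⟩
      rw [pvPosLoopA, lastTri]
      simp only [Option.getD_some]
      rw [if_neg hlt]

theorem posLoop_spec (n : Int) (acc : List Int) (g : Int) (hg : 0 < g) (m : Nat)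
    (hacc : acc = (List.range (m + 1)).map triI) (hgap : g = (m : Int) + 3) :
    ∃ M : Nat, pvPosLoopA n acc g hg = (List.range (M + 1)).map triI ∧ n ≤ triI M := by
  subst hacc; subst hgap
  exact posLoop_aux n (n - triI m).toNat m hg (le_refl _)

theorem main_loop_eq (fibs pos : List Int) (M : Nat)
    (hfib : ∀ k (h : k < fibs.length), fibs[k] = fibI k)
    (hpos : pos = (List.range (M + 1)).map triI)
    (n : Int) (hflen : n ≤ (fibs.length : Int)) (hM : n ≤ triI M) :
    ∀ (rem : Nat) (i : Int) (L F : Nat) (letter : Char) (res : List String),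
      i + rem = n + 1 → 1 ≤ i →
      (∀ k, k < L → triI k < i) → i ≤ triI L →
      (F : Int) = i - 1 - L →
      (pvMainLoopA fibs pos rem i res letter (F : Int)).1
        = pvLoopB rem i (fibI F) (fibI (F + 1)) (triI L) ((L : Int) + 3) letter res := by
  intro rem
  induction rem with
  | zero =>
    intro i L F letter res _ _ _ _ _
    simp [pvMainLoopA, pvLoopB]
  | succ rem ih =>
    intro i L F letter res hsum hi1 hpre hnlp hF
    have hi_le_n : i ≤ n := by omega
    have hmem : pos.contains i = true ↔ i = triI L := by
      subst hpos
      rw [List.contains_iff_mem]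
      simp only [List.mem_map, List.mem_range]
      constructor
      · rintro ⟨k, hkM, rfl⟩
        rcases lt_trichotomy k L with h | h | h
        · have := hpre k h; omega
        · rw [h]
        · have := triI_mono h; omega
      · intro h
        refine ⟨L, ?_, h.symm⟩
        by_contra hLM
        have hML : M < L := by omega
        have := triI_mono hML
        omega
    by_cases hcase : i = triI L
    · -- letter position
      simp only [pvMainLoopA, pvLoopB]
      rw [if_pos (hmem.mpr hcase), if_pos hcase]
      have h1 : triI L + ((L : Int) + 3) = triI (L + 1) := by
        simp only [triI]
      have h2 : ((L : Int) + 3) + 1 = ((L + 1 : Nat) : Int) + 3 := by push_cast; ring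
      rw [h1, h2]
      apply ih (i + 1) (L + 1) F _ _
      · omega
      · omega
      · intro k hk
        rcases Nat.lt_or_ge k L with h | h
        · have := hpre k h; omega
        · have hkL : k = L := by omega
          subst hkL; omega
      · rw [show triI (L + 1) = triI L + ((L : Int) + 3) from h1.symm]; omega
      · push_cast; omega
    · -- Fibonacci position
      simp only [pvMainLoopA, pvLoopB]
      rw [if_neg (fun h => hcase (hmem.mp h)), if_neg hcase]
      have hFlt : F < fibs.length := by omega
      have hget : (PySem.List.pyGet? fibs (F : Int)).getD 0 = fibI F := by
        rw [PySem.List.pyGet?_natCast, List.getElem?_eq_getElem hFlt]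
        simp only [Option.getD_some]
        exact hfib F hFlt
      rw [hget]
      have hfib2 : fibI F + fibI (F + 1) = fibI (F + 2) := by simp [fibI]
      rw [hfib2]
      have hcast : (F : Int) + 1 = ((F + 1 : Nat) : Int) := by push_cast; ring
      rw [hcast]
      apply ih (i + 1) L (F + 1) _ _
      · omega
      · omega
      · intro k hk; have := hpre k hk; omega
      · omega
      · push_cast; omega

-- ===== VERDICT (by name: the statement is the Claim_ definition above) =====
theorem InfinityKos_spec : Claim_equal_InfinityKos := by
  intro n _
  unfold Spec_InfinityKos InfinityKos InfinityKos_alt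
  by_cases hn : n < 1
  · simp [hn]
  · simp only [if_neg hn]
    rw [not_lt] at hn
    obtain ⟨hlen, hfib⟩ := fibLoop_spec n [1, 1] (by simp) (by
      intro k hk
      simp at hk
      interval_cases k <;> rfl)
    obtain ⟨M, hposEq, hM⟩ := posLoop_spec n [2] 3 (by omega) 0
      (by simp [triI]) (by norm_num)
    rw [hposEq]
    have hmain := main_loop_eq (pvFibLoopA n [1, 1]) ((List.range (M + 1)).map triI) M hfib rfl
      n hlen hM n.toNat 1 0 0 'A' []
      (by omega) (by omega) (by omega) (by simp [triI]) (by simp)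
    simp only [Nat.cast_zero] at hmain
    rw [hmain]
    norm_num [fibI, triI]
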